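-- pv_equiv track=rewrite | github.com/alatyrTeam/Dashboard-AI-mention-service | backend/app/domain.py | merge_citation_formats
-- ===== SOURCE A (Python) =====
-- def normalize_citation_format(value: str | None) -> str | None:
--     categories: set[str] = set()
--     saw_na = False
--
--     for item in (value or "").split(","):
--         cleaned = item.strip()
--         if not cleaned:
--             continue
--         lowered = cleaned.lower()
--         if lowered in {"n/a", "na", "none", "null"} or "n/a" in lowered:
--             saw_na = True
--             continue
--         if any(token in lowered for token in ("url", "link", "http://", "https://", "www.")):
--             categories.add("url")
--             continue
--         categories.add("text")
--
--     ordered = [label for label in ("text", "url") if label in categories]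
--     if ordered:
--         return ", ".join(ordered)
--     if saw_na:
--         return "N/A"
--     return None
--
-- def merge_citation_formats(values: list[str | None]) -> str | None:
--     categories: set[str] = set()
--     saw_na = False
--
--     for value in values:
--         normalized = normalize_citation_format(value)
--         if normalized == "N/A":
--             saw_na = True
--             continue
--         for item in (normalized or "").split(","):
--             cleaned = item.strip()
--             if cleaned in {"text", "url"}:
--                 categories.add(cleaned)
--
--     ordered = [label for label in ("text", "url") if label in categories]
--     if ordered:
--         return ", ".join(ordered)
--     if saw_na:
--         return "N/A"
--     return None
-- ===== SOURCE B (Python) =====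
-- def merge_citation_formats(values):
--     # Alternative structure: classify each item to a 3-bit code (1=text, 2=url, 4=na),
--     # OR the codes into one integer mask, and decode via an 8-entry lookup table.
--     NA_WORDS = ("n/a", "na", "none", "null")
--     URL_TOKENS = ("url", "link", "http://", "https://", "www.")
--     mask = 0
--     for value in values:
--         for item in (value or "").split(","):
--             w = item.strip().lower()
--             if not w:
--                 continue
--             if w in NA_WORDS or "n/a" in w:
--                 mask |= 4
--             elif any(t in w for t in URL_TOKENS):
--                 mask |= 2
--             else:
--                 mask |= 1
--     table = (None, "text", "url", "text, url", "N/A", "text", "url", "text, url")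
--     return table[mask]
-- ===== Notes on version B (the rewrite author's own statement) =====
-- stated objective: alternative
-- what changed: B drops the per-value normalization to an intermediate string (which A re-splits and re-parses) and the set-plus-flag state: it classifies every comma-separated item of every value in one flattened pass, ORs a 3-bit category code (1=text, 2=url, 4=na) into a single integer mask, and decodes the final answer with an 8-entry lookup table.
import Mathlib
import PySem

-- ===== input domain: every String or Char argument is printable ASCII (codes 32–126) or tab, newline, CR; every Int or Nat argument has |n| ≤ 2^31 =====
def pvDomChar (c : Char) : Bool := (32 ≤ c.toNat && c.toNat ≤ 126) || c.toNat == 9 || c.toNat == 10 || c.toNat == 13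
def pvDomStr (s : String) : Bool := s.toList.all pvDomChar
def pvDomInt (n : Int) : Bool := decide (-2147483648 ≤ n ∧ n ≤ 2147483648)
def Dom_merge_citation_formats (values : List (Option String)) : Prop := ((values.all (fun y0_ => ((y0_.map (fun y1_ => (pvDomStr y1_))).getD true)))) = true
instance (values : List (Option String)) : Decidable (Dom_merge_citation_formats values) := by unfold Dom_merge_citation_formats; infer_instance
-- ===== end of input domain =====

-- B replaces A's per-value normalization to an intermediate string (re-split and re-parsed
-- by the merge loop, with a set+flag state) by one flattened pass that ORs a 3-bit category
-- code per item into a single integer mask, decoded at the end by an 8-entry lookup table.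

-- ===== PORT A =====
-- s.split(","): the separator is the non-empty literal ",", so split? is always `some`;
-- the `getD []` default is unreachable.
def pySplitComma (s : String) : List String := (PySem.Str.split? s ",").getD []

-- body of normalize_citation_format's per-item loop
def normStepA (st : PySem.Set String × Bool) (item : String) : PySem.Set String × Bool :=
  let cleaned := PySem.Str.strip item
  if cleaned = "" then st
  else
    let lowered := PySem.Str.lower cleaned
    if (lowered = "n/a" || lowered = "na" || lowered = "none" || lowered = "null")
        || PySem.Str.isIn "n/a" lowered then (st.1, true)
    else if ["url", "link", "http://", "https://", "www."].any
        (fun token => PySem.Str.isIn token lowered) then (st.1.add "url", st.2)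
    else (st.1.add "text", st.2)

def normalize_citation_format (value : Option String) : Option String :=
  let st := (pySplitComma (value.getD "")).foldl normStepA (PySem.Set.empty, false)
  let ordered := ["text", "url"].filter (fun label => st.1.contains label)
  if ordered ≠ [] then some (PySem.Str.join ", " ordered)
  else if st.2 then some "N/A"
  else none

-- body of merge_citation_formats's inner per-item loop
def mergeCatStepA (cats : PySem.Set String) (item : String) : PySem.Set String :=
  let cleaned := PySem.Str.strip item
  if cleaned = "text" || cleaned = "url" then cats.add cleaned else cats

-- body of merge_citation_formats's per-value loop
def mergeStepA (st : PySem.Set String × Bool) (value : Option String) :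
    PySem.Set String × Bool :=
  let normalized := normalize_citation_format value
  if normalized = some "N/A" then (st.1, true)
  else ((pySplitComma (normalized.getD "")).foldl mergeCatStepA st.1, st.2)

def finalizeA (st : PySem.Set String × Bool) : Option String :=
  let ordered := ["text", "url"].filter (fun label => st.1.contains label)
  if ordered ≠ [] then some (PySem.Str.join ", " ordered)
  else if st.2 then some "N/A"
  else none

def merge_citation_formats (values : List (Option String)) : Option String :=
  finalizeA (values.foldl mergeStepA (PySem.Set.empty, false))

-- ===== PORT B =====
def pyNaWords : List String := ["n/a", "na", "none", "null"]
def pyUrlTokens : List String := ["url", "link", "http://", "https://", "www."]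

-- body of B's inner loop: OR the item's category code (1=text, 2=url, 4=na) into the mask
def itemMaskStep (m : Nat) (item : String) : Nat :=
  let w := PySem.Str.lower (PySem.Str.strip item)
  if w = "" then m
  else if pyNaWords.contains w || PySem.Str.isIn "n/a" w then m ||| 4
  else if pyUrlTokens.any (fun t => PySem.Str.isIn t w) then m ||| 2
  else m ||| 1

def maskTable : List (Option String) :=
  [none, some "text", some "url", some "text, url",
   some "N/A", some "text", some "url", some "text, url"]

def merge_citation_formats_alt (values : List (Option String)) : Option String :=
  let mask := values.foldl
    (fun m value => (pySplitComma (value.getD "")).foldl itemMaskStep m) 0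
  -- mask is an OR of values in {0,1,2,4}, hence ≤ 7 < 8 = len(table): the out-of-range
  -- default of pyGetD (Python: IndexError) is unreachable.
  PySem.List.pyGetD maskTable (mask : Int) none

-- ===== PRECONDITION & SPEC =====
def Spec_merge_citation_formats (values : List (Option String)) (out : Option String) : Prop := out = merge_citation_formats_alt values
instance (values : List (Option String)) (out : Option String) : Decidable (Spec_merge_citation_formats values out) := by unfold Spec_merge_citation_formats; infer_instance

-- ===== CLAIM (what is proved, stated in full; the proofs are below) =====
def Claim_equal_merge_citation_formats : Prop := ∀ (values : List (Option String)), Dom_merge_citation_formats values → Spec_merge_citation_formats values (merge_citation_formats values)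

-- ===== LEMMAS AND PROOFS =====

-- how a single item is classified (shared vocabulary of both ports)
inductive PvCls : Type
  | skip | na | url | text
deriving DecidableEq

def pvClassify (item : String) : PvCls :=
  let lowered := PySem.Str.lower (PySem.Str.strip item)
  if lowered = "" then .skip
  else if (lowered = "n/a" || lowered = "na" || lowered = "none" || lowered = "null")
      || PySem.Str.isIn "n/a" lowered then .na
  else if ["url", "link", "http://", "https://", "www."].any
      (fun token => PySem.Str.isIn token lowered) then .url
  else .text

-- per-value item-category flags
def pvHasT (L : List String) : Bool := L.any (fun i => pvClassify i == .text)
def pvHasU (L : List String) : Bool := L.any (fun i => pvClassify i == .url)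
def pvHasN (L : List String) : Bool := L.any (fun i => pvClassify i == .na)

-- global flags over all values
def pvItems (v : Option String) : List String := pySplitComma (v.getD "")
def pvGT (vs : List (Option String)) : Bool := vs.any (fun v => pvHasT (pvItems v))
def pvGU (vs : List (Option String)) : Bool := vs.any (fun v => pvHasU (pvItems v))
def pvGN (vs : List (Option String)) : Bool := vs.any (fun v => pvHasN (pvItems v))

theorem pv_lower_eq_empty (s : String) : PySem.Str.lower s = "" ↔ s = "" := by
  constructor
  · intro h
    have h2 := congrArg String.toList h
    simpa [PySem.Str.toList_lower, PySem.Chars.lower] using h2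
  · intro h; subst h; rfl

theorem normStepA_classify (st : PySem.Set String × Bool) (item : String) :
    normStepA st item =
      match pvClassify item with
      | .skip => st
      | .na => (st.1, true)
      | .url => (st.1.add "url", st.2)
      | .text => (st.1.add "text", st.2) := by
  unfold normStepA pvClassify
  by_cases h : PySem.Str.strip item = ""
  · have h1 : PySem.Str.lower (PySem.Str.strip item) = "" := (pv_lower_eq_empty _).mpr h
    rw [h] at h1
    simp [h, h1]
  · have h1 : ¬ PySem.Str.lower (PySem.Str.strip item) = "" :=
      fun hl => h ((pv_lower_eq_empty _).mp hl)
    simp only [h, h1, if_false]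
    split_ifs <;> rfl

theorem itemMaskStep_classify (m : Nat) (item : String) :
    itemMaskStep m item =
      match pvClassify item with
      | .skip => m
      | .na => m ||| 4
      | .url => m ||| 2
      | .text => m ||| 1 := by
  unfold itemMaskStep pvClassify
  have hc : (pyNaWords.contains (PySem.Str.lower (PySem.Str.strip item)))
      = ((decide (PySem.Str.lower (PySem.Str.strip item) = "n/a")
          || decide (PySem.Str.lower (PySem.Str.strip item) = "na")
          || decide (PySem.Str.lower (PySem.Str.strip item) = "none")
          || decide (PySem.Str.lower (PySem.Str.strip item) = "null"))) := by
    simp [pyNaWords, List.contains_eq_mem, Bool.or_assoc]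
  simp only [pyUrlTokens, hc]
  split_ifs <;> rfl

-- the mask as a function of the three flags
def pvEncode (t u n : Bool) : Nat :=
  (if t then 1 else 0) + (if u then 2 else 0) + (if n then 4 else 0)

theorem encode_lor1 : ∀ t u n : Bool, pvEncode t u n ||| 1 = pvEncode true u n := by decide
theorem encode_lor2 : ∀ t u n : Bool, pvEncode t u n ||| 2 = pvEncode t true n := by decide
theorem encode_lor4 : ∀ t u n : Bool, pvEncode t u n ||| 4 = pvEncode t u true := by decide

theorem pvcls_beq_simp :
    ((PvCls.na == PvCls.text) = false) ∧ ((PvCls.na == PvCls.url) = false) ∧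
    ((PvCls.url == PvCls.text) = false) ∧ ((PvCls.url == PvCls.na) = false) ∧
    ((PvCls.text == PvCls.url) = false) ∧ ((PvCls.text == PvCls.na) = false) := by decide

theorem maskFold_inner (L : List String) (t u n : Bool) :
    L.foldl itemMaskStep (pvEncode t u n)
      = pvEncode (t || pvHasT L) (u || pvHasU L) (n || pvHasN L) := by
  induction L generalizing t u n with
  | nil => simp [pvHasT, pvHasU, pvHasN]
  | cons i tl ih =>
    rw [List.foldl_cons, itemMaskStep_classify]
    cases hc : pvClassify i
    case skip => simpa [pvHasT, pvHasU, pvHasN, hc] using ih t u n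
    case na =>
      rw [encode_lor4, ih]
      simp [pvHasT, pvHasU, pvHasN, hc, pvcls_beq_simp.1, pvcls_beq_simp.2.1,
        pvcls_beq_simp.2.2.1, pvcls_beq_simp.2.2.2.1, pvcls_beq_simp.2.2.2.2.1,
        pvcls_beq_simp.2.2.2.2.2]
    case url =>
      rw [encode_lor2, ih]
      simp [pvHasT, pvHasU, pvHasN, hc, pvcls_beq_simp.1, pvcls_beq_simp.2.1,
        pvcls_beq_simp.2.2.1, pvcls_beq_simp.2.2.2.1, pvcls_beq_simp.2.2.2.2.1,
        pvcls_beq_simp.2.2.2.2.2]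
    case text =>
      rw [encode_lor1, ih]
      simp [pvHasT, pvHasU, pvHasN, hc, pvcls_beq_simp.1, pvcls_beq_simp.2.1,
        pvcls_beq_simp.2.2.1, pvcls_beq_simp.2.2.2.1, pvcls_beq_simp.2.2.2.2.1,
        pvcls_beq_simp.2.2.2.2.2]

theorem maskFold_outer (vs : List (Option String)) (t u n : Bool) :
    vs.foldl (fun m value => (pySplitComma (value.getD "")).foldl itemMaskStep m)
        (pvEncode t u n)
      = pvEncode (t || pvGT vs) (u || pvGU vs) (n || pvGN vs) := by
  induction vs generalizing t u n with
  | nil => simp [pvGT, pvGU, pvGN]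
  | cons v tl ih =>
    rw [List.foldl_cons]
    show List.foldl _ (List.foldl itemMaskStep (pvEncode t u n) (pySplitComma (v.getD ""))) tl = _
    rw [maskFold_inner, ih]
    simp [pvGT, pvGU, pvGN, pvItems, Bool.or_assoc]

theorem alt_eq_table (vs : List (Option String)) :
    merge_citation_formats_alt vs
      = PySem.List.pyGetD maskTable ((pvEncode (pvGT vs) (pvGU vs) (pvGN vs) : Nat) : Int) none := by
  unfold merge_citation_formats_alt
  have h0 : (0 : Nat) = pvEncode false false false := rfl
  rw [h0, maskFold_outer]
  simp

-- ----- A side -----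

theorem finalizeA_eq (st : PySem.Set String × Bool) :
    finalizeA st =
      (if "text" ∈ st.1 then (if "url" ∈ st.1 then some "text, url" else some "text")
       else if "url" ∈ st.1 then some "url"
       else if st.2 then some "N/A"
       else none) := by
  unfold finalizeA
  by_cases h1 : "text" ∈ st.1 <;> by_cases h2 : "url" ∈ st.1 <;>
    cases hs : st.2 <;> simp [List.filter, h1, h2, hs] <;> rfl

-- characterization of normalize's per-item fold
theorem normFold_spec (L : List String) (c : PySem.Set String) (s : Bool) :
    (("text" ∈ (L.foldl normStepA (c, s)).1 ↔ "text" ∈ c ∨ pvHasT L = true) ∧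
     ("url" ∈ (L.foldl normStepA (c, s)).1 ↔ "url" ∈ c ∨ pvHasU L = true)) ∧
     (L.foldl normStepA (c, s)).2 = (s || pvHasN L) := by
  induction L generalizing c s with
  | nil => simp [pvHasT, pvHasU, pvHasN]
  | cons i t ih =>
    have ne1 : ("text" : String) ≠ "url" := by decide
    have ne2 : ("url" : String) ≠ "text" := by decide
    rw [List.foldl_cons, normStepA_classify]
    cases hc : pvClassify i
    case skip =>
      simp only [hc]
      simpa [pvHasT, pvHasU, pvHasN, hc] using ih c s
    case na =>
      simp only [hc]
      have := ih c true
      simp [pvHasT, pvHasU, pvHasN, hc] at this ⊢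
      exact this
    case url =>
      simp only [hc]
      have := ih (c.add "url") s
      simp [pvHasT, pvHasU, pvHasN, hc, PySem.Set.mem_add, ne1, ne2] at this ⊢
      exact this
    case text =>
      simp only [hc]
      have := ih (c.add "text") s
      simp [pvHasT, pvHasU, pvHasN, hc, PySem.Set.mem_add, ne1, ne2] at this ⊢
      exact this

theorem normalize_cases (value : Option String) :
    normalize_citation_format value =
      (let L := pvItems value
       if pvHasT L then (if pvHasU L then some "text, url" else some "text")
       else if pvHasU L then some "url"
       else if pvHasN L then some "N/A"
       else none) := by
  unfold normalize_citation_format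
  show finalizeA ((pySplitComma (value.getD "")).foldl normStepA (PySem.Set.empty, false)) = _
  obtain ⟨⟨hT, hU⟩, hN⟩ := normFold_spec (pySplitComma (value.getD "")) PySem.Set.empty false
  rw [finalizeA_eq]
  simp [PySem.Set.empty] at hT hU hN
  cases ht : pvHasT (pySplitComma (value.getD "")) <;>
    cases hu : pvHasU (pySplitComma (value.getD "")) <;>
    cases hn : pvHasN (pySplitComma (value.getD "")) <;>
    simp [pvItems, ht, hu, hn, PySem.Set.empty] at hT hU hN ⊢ <;> simp [hT, hU, hN]

theorem mergeStepA_spec (st : PySem.Set String × Bool) (value : Option String) :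
    mergeStepA st value =
      (let L := pvItems value
       if pvHasT L then
         (if pvHasU L then ((st.1.add "text").add "url", st.2) else (st.1.add "text", st.2))
       else if pvHasU L then (st.1.add "url", st.2)
       else if pvHasN L then (st.1, true)
       else st) := by
  have e1 : pySplitComma "text, url" = ["text", " url"] := by decide
  have e2 : pySplitComma "text" = ["text"] := by decide
  have e3 : pySplitComma "url" = ["url"] := by decide
  have e0 : pySplitComma "" = [""] := by decide
  have m1 : ∀ c : PySem.Set String, mergeCatStepA c "text" = c.add "text" := fun c => by
    unfold mergeCatStepA
    rw [show PySem.Str.strip "text" = "text" from by decide]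
    simp
  have m2 : ∀ c : PySem.Set String, mergeCatStepA c " url" = c.add "url" := fun c => by
    unfold mergeCatStepA
    rw [show PySem.Str.strip " url" = "url" from by decide]
    simp
  have m4 : ∀ c : PySem.Set String, mergeCatStepA c "url" = c.add "url" := fun c => by
    unfold mergeCatStepA
    rw [show PySem.Str.strip "url" = "url" from by decide]
    simp
  have m3 : ∀ c : PySem.Set String, mergeCatStepA c "" = c := fun c => by
    unfold mergeCatStepA
    rw [show PySem.Str.strip "" = "" from by decide]
    simp
  unfold mergeStepA
  rw [normalize_cases]
  simp only [pvItems]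
  by_cases ht : pvHasT (pySplitComma (value.getD "")) = true <;>
    by_cases hu : pvHasU (pySplitComma (value.getD "")) = true <;>
    by_cases hn : pvHasN (pySplitComma (value.getD "")) = true <;>
    simp [ht, hu, hn, e0, e1, e2, e3, m1, m2, m3, m4]

-- A's saw_na flag fires only on values that normalized to exactly "N/A"
def pvPureNA (v : Option String) : Bool :=
  pvHasN (pvItems v) && !pvHasT (pvItems v) && !pvHasU (pvItems v)

theorem mergeFold_spec (vs : List (Option String)) (c : PySem.Set String) (s : Bool) :
    (("text" ∈ (vs.foldl mergeStepA (c, s)).1 ↔ "text" ∈ c ∨ pvGT vs = true) ∧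
     ("url" ∈ (vs.foldl mergeStepA (c, s)).1 ↔ "url" ∈ c ∨ pvGU vs = true)) ∧
     (vs.foldl mergeStepA (c, s)).2 = (s || vs.any pvPureNA) := by
  induction vs generalizing c s with
  | nil => simp [pvGT, pvGU]
  | cons v tl ih =>
    have ne1 : ("text" : String) ≠ "url" := by decide
    have ne2 : ("url" : String) ≠ "text" := by decide
    rw [List.foldl_cons, mergeStepA_spec]
    simp only [pvItems]
    cases ht : pvHasT (pySplitComma (v.getD "")) <;>
      cases hu : pvHasU (pySplitComma (v.getD "")) <;>
      cases hn : pvHasN (pySplitComma (v.getD ""))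
    -- skip value
    case false.false.false =>
      have := ih c s
      simp [pvGT, pvGU, pvPureNA, pvItems, ht, hu, hn] at this ⊢
      exact this
    -- pure-NA value
    case false.false.true =>
      have := ih c true
      simp [pvGT, pvGU, pvPureNA, pvItems, ht, hu, hn] at this ⊢
      exact this
    -- url-only value (with or without na items)
    case false.true.false | false.true.true =>
      have := ih (c.add "url") s
      simp [pvGT, pvGU, pvPureNA, pvItems, ht, hu, hn, PySem.Set.mem_add, ne1, ne2] at this ⊢
      tauto
    -- text-only value
    case true.false.false | true.false.true =>
      have := ih (c.add "text") s
      simp [pvGT, pvGU, pvPureNA, pvItems, ht, hu, hn, PySem.Set.mem_add, ne1, ne2] at this ⊢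
      tauto
    -- text-and-url value
    case true.true.false | true.true.true =>
      have := ih ((c.add "text").add "url") s
      simp [pvGT, pvGU, pvPureNA, pvItems, ht, hu, hn, PySem.Set.mem_add, ne1, ne2] at this ⊢
      tauto

-- when no value contributes text or url, A's "pure N/A" flag coincides with the global na flag
theorem pureNA_eq_GN (vs : List (Option String)) (ht : pvGT vs = false) (hu : pvGU vs = false) :
    vs.any pvPureNA = pvGN vs := by
  unfold pvGN
  apply PySem.List.any_congr_mem
  intro v hv
  have h1 : pvHasT (pvItems v) = false := by
    by_contra h
    have : pvGT vs = true := by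
      unfold pvGT
      exact List.any_eq_true.mpr ⟨v, hv, by simpa using h⟩
    simp [this] at ht
  have h2 : pvHasU (pvItems v) = false := by
    by_contra h
    have : pvGU vs = true := by
      unfold pvGU
      exact List.any_eq_true.mpr ⟨v, hv, by simpa using h⟩
    simp [this] at hu
  simp [pvPureNA, h1, h2]

-- ===== VERDICT (by name: the statement is the Claim_ definition above) =====
theorem merge_citation_formats_spec : Claim_equal_merge_citation_formats := by
  intro values _
  unfold Spec_merge_citation_formats
  rw [alt_eq_table]
  unfold merge_citation_formats
  obtain ⟨⟨hT, hU⟩, hN⟩ := mergeFold_spec values PySem.Set.empty false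
  rw [finalizeA_eq]
  simp [PySem.Set.empty] at hT hU hN
  cases ht : pvGT values <;> cases hu : pvGU values
  · -- no text, no url: flag decides
    rw [pureNA_eq_GN values ht hu] at hN
    cases hn : pvGN values <;>
      simp [ht, hu, hn, pvEncode] at hT hU hN ⊢ <;>
      simp [hT, hU, hN, maskTable, PySem.List.pyGetD]
  all_goals
    cases hn : pvGN values <;>
      simp [ht, hu, hn, pvEncode] at hT hU hN ⊢ <;>
      simp [hT, hU, hN, maskTable, PySem.List.pyGetD]
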